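-- pv_equiv track=rewrite | github.com/KamilRybacki/operations | utils/wizards/flatvars.py | format_key
-- ===== SOURCE A (Python) =====
-- def format_key(key: str) -> str:
--     """
--     Format the key to be used in the flattened dictionary.
--     For each section separated by underscores, split snake case
--     and join individual words with underscores.
--     """
--     formatted_sections = []
--     for section in key.split('_'):
--         split_snake_case_words = []
--         first_pointer = 0
--         second_pointer = 1
--         while second_pointer < len(section):
--             if section[second_pointer].isupper():
--                 split_snake_case_words.append(
--                     section[first_pointer:second_pointer].lower()
--                 )
--                 first_pointer = second_pointer
--             second_pointer += 1
--         split_snake_case_words.append(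
--             section[first_pointer:second_pointer].lower()
--         )
--         formatted_sections.append(
--             '_'.join(split_snake_case_words)
--         )
--     return '_'.join(formatted_sections)
-- ===== SOURCE B (Python) =====
-- def format_key(key: str) -> str:
--     out = []
--     prev = None
--     for c in key:
--         if c.isupper() and prev is not None and prev != '_':
--             out.append('_')
--         out.append(c.lower())
--         prev = c
--     return ''.join(out)
-- ===== Notes on version B (the rewrite author's own statement) =====
-- stated objective: simpler
-- what changed: Replaced split-on-underscore plus a two-pointer word-slicing loop per section (sections and words each rejoined with underscores) by a single pass over the characters that lowercases each one and inserts an underscore before an uppercase character that is not at the start and not right after an underscore.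
import Mathlib
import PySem

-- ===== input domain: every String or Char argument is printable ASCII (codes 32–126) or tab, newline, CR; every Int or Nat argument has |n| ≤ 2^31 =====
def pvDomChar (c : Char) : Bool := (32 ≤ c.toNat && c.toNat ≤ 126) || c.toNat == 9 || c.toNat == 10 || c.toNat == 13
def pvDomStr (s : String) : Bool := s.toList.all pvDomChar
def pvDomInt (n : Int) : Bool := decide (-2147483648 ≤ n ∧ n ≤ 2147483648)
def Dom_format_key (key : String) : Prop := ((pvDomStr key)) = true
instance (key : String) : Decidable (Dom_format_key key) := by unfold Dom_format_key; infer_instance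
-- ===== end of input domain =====

-- Equivalence of A (split on '_' + two-pointer camelCase word slicing, rejoined) with B,
-- a simpler single pass that lowercases each char and inserts '_' before an uppercase
-- char not at the start and not right after '_'. Return values only; objective: simpler.


-- ===== PORT A =====
-- A's inner while loop: two pointers over a section, slicing off a word before each uppercase char.
def fkWords (cs : List Char) (first second : Nat) (acc : List (List Char)) : List (List Char) :=
  if h : second < cs.length then
    if PySem.Chars.isupper cs[second] then
      fkWords cs second (second + 1)
        (acc ++ [PySem.Chars.lower (PySem.List.slice cs (some (first : Int)) (some (second : Int)))])
    else
      fkWords cs first (second + 1) acc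
  else
    acc ++ [PySem.Chars.lower (PySem.List.slice cs (some (first : Int)) (some (second : Int)))]
termination_by cs.length - second

def format_key (key : String) : String :=
  String.mk (PySem.Chars.join ['_']
    ((PySem.Chars.splitOn key.toList ['_']).map
      (fun sec => PySem.Chars.join ['_'] (fkWords sec 0 1 []))))

-- ===== PORT B =====
-- B: one pass, carrying the output so far and the previous character (None at the start).
def format_key_alt (key : String) : String :=
  String.mk
    (key.toList.foldl
      (fun (st : List Char × Option Char) c =>
        ((if PySem.Chars.isupper c &&
              (match st.2 with | none => false | some p => p != '_') then
            st.1 ++ ['_']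
          else st.1) ++ [PySem.Chars.lowerChar c], some c))
      ([], none)).1

-- ===== PRECONDITION & SPEC =====
def Spec_format_key (key : String) (out : String) : Prop := out = format_key_alt key
instance (key : String) (out : String) : Decidable (Spec_format_key key out) := by unfold Spec_format_key; infer_instance

-- ===== CLAIM (what is proved, stated in full; the proofs are below) =====
def Claim_equal_format_key : Prop := ∀ (key : String), Dom_format_key key → Spec_format_key key (format_key key)

-- ===== LEMMAS AND PROOFS =====

-- The common middle form: one pass over the characters; `blocked` = we are at the start
-- of the string or right after an underscore, so no separator is inserted before an uppercase.
def fkGo (cs : List Char) (blocked : Bool) : List Char :=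
  match cs with
  | [] => []
  | c :: rest =>
    (if PySem.Chars.isupper c && !blocked then ['_'] else []) ++
      PySem.Chars.lowerChar c :: fkGo rest (c == '_')

-- Uniform per-char form of A's inner loop output (sections contain no '_').
def fkBody (cs : List Char) : List Char :=
  match cs with
  | [] => []
  | c :: rest => (if PySem.Chars.isupper c then ['_'] else []) ++ PySem.Chars.lowerChar c :: fkBody rest

def fkInner (sec : List Char) : List Char :=
  match sec with
  | [] => []
  | c :: rest => PySem.Chars.lowerChar c :: fkBody rest

-- Structural version of str.split('_').
def mySplit : List Char → List (List Char)
  | [] => [[]]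
  | c :: rest => if c = '_' then [] :: mySplit rest else (mySplit rest).modifyHead (c :: ·)

theorem mySplit_ne_nil (cs : List Char) : mySplit cs ≠ [] := by
  induction cs with
  | nil => simp [mySplit]
  | cons c rest ih =>
    simp only [mySplit]
    split
    · simp
    · cases h : mySplit rest with
      | nil => exact absurd h ih
      | cons s ss => simp

theorem splitOn_go_eq (fuel : Nat) : ∀ (l cur : List Char) (acc : List (List Char)),
    l.length ≤ fuel →
    PySem.Chars.splitOn.go ['_'] fuel l cur acc =
      acc.reverse ++ (mySplit l).modifyHead (cur.reverse ++ ·) := by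
  induction fuel with
  | zero =>
    intro l cur acc hl
    have : l = [] := List.length_eq_zero_iff.mp (Nat.le_zero.mp hl)
    subst this
    simp [PySem.Chars.splitOn.go, mySplit]
  | succ f ih =>
    intro l cur acc hl
    cases l with
    | nil => simp [PySem.Chars.splitOn.go, mySplit]
    | cons c rest =>
      simp only [PySem.Chars.splitOn.go]
      by_cases hc : c = '_'
      · subst hc
        have hpre : List.isPrefixOf ['_'] ('_' :: rest) = true := by
          simp [List.isPrefixOf]
        rw [if_pos hpre]
        rw [ih _ _ _ (by simpa using Nat.lt_succ_iff.mp (by simpa using hl))]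
        simp [mySplit]
        cases h : mySplit rest with
        | nil => exact absurd h (mySplit_ne_nil rest)
        | cons s ss => simp
      · have hpre : List.isPrefixOf ['_'] (c :: rest) = false := by
          simp [List.isPrefixOf]
          exact fun h => absurd h.symm hc
        rw [if_neg (by simp [hpre])]
        rw [ih rest (c :: cur) acc (by simpa using Nat.lt_succ_iff.mp (by simpa using hl))]
        simp only [mySplit, if_neg hc]
        cases h : mySplit rest with
        | nil => exact absurd h (mySplit_ne_nil rest)
        | cons s ss => simp

theorem splitOn_eq_mySplit (cs : List Char) :
    PySem.Chars.splitOn cs ['_'] = mySplit cs := by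
  have h := splitOn_go_eq (cs.length + 1) cs [] [] (by omega)
  have h2 : List.modifyHead (fun x => x) (mySplit cs) = mySplit cs := by
    cases mySplit cs <;> simp
  simp only [PySem.Chars.splitOn]
  simpa [h2] using h

-- leading separator that the "mid-section" form inserts before its first char
def preC (cs : List Char) : List Char :=
  match cs with
  | [] => []
  | c :: _ => if PySem.Chars.isupper c then ['_'] else []

theorem fkGo_false (cs : List Char) : fkGo cs false = preC cs ++ fkGo cs true := by
  cases cs with
  | nil => simp [fkGo, preC]
  | cons c rest => simp [fkGo, preC]

theorem fkBody_eq (c : Char) (rest : List Char) :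
    fkBody (c :: rest) = preC (c :: rest) ++ fkInner (c :: rest) := by
  simp [fkBody, preC, fkInner]

theorem mySplit_head_preC (cs : List Char) (s0 : List Char) (ss : List (List Char))
    (h : mySplit cs = s0 :: ss) : preC s0 = preC cs := by
  cases cs with
  | nil => simp [mySplit] at h; simp [h.1]
  | cons c rest =>
    simp only [mySplit] at h
    by_cases hc : c = '_'
    · rw [if_pos hc] at h
      have : s0 = [] := (List.cons_eq_cons.mp h).1.symm
      subst this hc
      simp [preC, PySem.Chars.isupper]
    · rw [if_neg hc] at h
      cases h2 : mySplit rest with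
      | nil => exact absurd h2 (mySplit_ne_nil rest)
      | cons t ts =>
        rw [h2] at h
        simp at h
        rw [← h.1]
        simp [preC]

theorem join_map_inner (cs : List Char) :
    PySem.Chars.join ['_'] ((mySplit cs).map fkInner) = fkGo cs true := by
  induction cs with
  | nil => simp [mySplit, fkGo, fkInner, PySem.Chars.join_singleton]
  | cons c rest ih =>
    by_cases hc : c = '_'
    · subst hc
      rw [show mySplit ('_' :: rest) = [] :: mySplit rest from by simp [mySplit]]
      obtain ⟨s0, ss, h⟩ := List.exists_cons_of_ne_nil (mySplit_ne_nil rest)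
      rw [h]
      rw [h, List.map_cons] at ih
      rw [List.map_cons, List.map_cons, PySem.Chars.join_cons_cons, ih]
      have h1 : PySem.Chars.isupper '_' = false := by decide
      have h2 : PySem.Chars.lowerChar '_' = '_' := by decide
      simp [fkGo, h1, h2, fkInner]
    · simp only [mySplit, if_neg hc]
      obtain ⟨s0, ss, h⟩ := List.exists_cons_of_ne_nil (mySplit_ne_nil rest)
      rw [h]
      rw [h, List.map_cons] at ih
      simp only [List.modifyHead_cons, List.map_cons]
      have hup : (c == '_') = false := by simpa using hc
      cases s0 with
      | nil =>
        cases ss with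
        | nil =>
          simp only [List.map_nil] at ih ⊢
          rw [PySem.Chars.join_singleton]
          rw [PySem.Chars.join_singleton] at ih
          simp only [fkInner] at ih ⊢
          rw [fkGo, hup, fkGo_false rest, ← ih]
          have : preC rest = [] := by rw [← mySplit_head_preC rest [] [] h]; rfl
          simp [this, fkBody]
        | cons t ts =>
          simp only [List.map_cons] at ih ⊢
          rw [PySem.Chars.join_cons_cons]
          rw [PySem.Chars.join_cons_cons] at ih
          simp only [fkInner] at ih ⊢
          rw [fkGo, hup, fkGo_false rest, ← ih]
          have : preC rest = [] := by rw [← mySplit_head_preC rest [] (t :: ts) h]; rfl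
          simp [this, fkBody]
      | cons d rest0 =>
        have hpre : preC (d :: rest0) = preC rest := mySplit_head_preC rest _ _ h
        cases ss with
        | nil =>
          simp only [List.map_nil] at ih ⊢
          rw [PySem.Chars.join_singleton]
          rw [PySem.Chars.join_singleton] at ih
          rw [fkGo, hup, fkGo_false rest, ← ih]
          simp only [fkInner]
          rw [fkBody_eq, hpre]
          simp [fkInner]
        | cons t ts =>
          simp only [List.map_cons] at ih ⊢
          rw [PySem.Chars.join_cons_cons]
          rw [PySem.Chars.join_cons_cons] at ih
          rw [fkGo, hup, fkGo_false rest, ← ih]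
          simp only [fkInner]
          rw [fkBody_eq, hpre]
          simp [fkInner]

theorem fkWords_base (cs : List Char) (f s : Nat) (acc : List (List Char))
    (hs : ¬ s < cs.length) :
    fkWords cs f s acc = acc ++ [PySem.Chars.lower (PySem.List.slice cs (some (f : Int)) (some (s : Int)))] := by
  rw [fkWords]
  simp [hs]

theorem fkWords_acc : ∀ (n : Nat) (cs : List Char) (f s : Nat) (acc : List (List Char)),
    cs.length - s ≤ n → fkWords cs f s acc = acc ++ fkWords cs f s [] := by
  intro n
  induction n with
  | zero =>
    intro cs f s acc h
    have hs : ¬ s < cs.length := by omega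
    rw [fkWords_base cs f s acc hs, fkWords_base cs f s [] hs]
    simp
  | succ n ih =>
    intro cs f s acc h
    by_cases hs : s < cs.length
    · conv_lhs => rw [fkWords]
      conv_rhs => rw [fkWords]
      simp only [dif_pos hs]
      split
      · rw [ih cs s (s + 1) _ (by omega), ih cs s (s + 1) ([] ++ [_]) (by omega)]
        simp
      · rw [ih cs f (s + 1) acc (by omega), ih cs f (s + 1) [] (by omega)]
    · rw [fkWords_base cs f s acc hs, fkWords_base cs f s [] hs]
      simp

theorem fkWords_ne_nil : ∀ (n : Nat) (cs : List Char) (f s : Nat) (acc : List (List Char)),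
    cs.length - s ≤ n → fkWords cs f s acc ≠ [] := by
  intro n
  induction n with
  | zero =>
    intro cs f s acc h
    have hs : ¬ s < cs.length := by omega
    rw [fkWords_base cs f s acc hs]
    simp
  | succ n ih =>
    intro cs f s acc h
    by_cases hs : s < cs.length
    · conv_lhs => rw [fkWords]
      simp only [dif_pos hs]
      split
      · exact ih cs s (s + 1) _ (by omega)
      · exact ih cs f (s + 1) acc (by omega)
    · rw [fkWords_base cs f s acc hs]
      simp

theorem fkWords_join : ∀ (n : Nat) (cs : List Char) (f s : Nat), f ≤ s → cs.length - s ≤ n →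
    PySem.Chars.join ['_'] (fkWords cs f s []) =
      PySem.Chars.lower ((cs.drop f).take (s - f)) ++ fkBody (cs.drop s) := by
  intro n
  induction n with
  | zero =>
    intro cs f s hfs h
    have hs : ¬ s < cs.length := by omega
    rw [fkWords_base cs f s [] hs, List.nil_append, PySem.Chars.join_singleton]
    rw [PySem.List.slice_natCast]
    rw [show cs.drop s = ([] : List Char) from List.drop_eq_nil_of_le (by omega)]
    simp [fkBody]
  | succ n ih =>
    intro cs f s hfs h
    by_cases hs : s < cs.length
    · have hdrop : cs.drop s = cs[s] :: cs.drop (s + 1) := List.drop_eq_getElem_cons hs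
      conv_lhs => rw [fkWords]
      simp only [dif_pos hs]
      by_cases hup : PySem.Chars.isupper cs[s]
      · simp only [if_pos hup, List.nil_append]
        rw [fkWords_acc n cs s (s + 1) _ (by omega)]
        obtain ⟨q, t, hqt⟩ :=
          List.exists_cons_of_ne_nil (fkWords_ne_nil n cs s (s + 1) [] (by omega))
        rw [hqt]
        simp only [List.singleton_append]
        rw [PySem.Chars.join_cons_cons, ← hqt]
        rw [ih cs s (s + 1) (by omega) (by omega)]
        rw [hdrop]
        rw [show s + 1 - s = 1 from by omega]
        simp [PySem.List.slice_natCast, fkBody, hup, PySem.Chars.lower]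
        rw [← List.map_drop, hdrop]
        rfl
      · simp only [if_neg hup]
        rw [ih cs f (s + 1) (by omega) (by omega)]
        rw [hdrop]
        have h2 : (cs.drop f).take (s + 1 - f) = (cs.drop f).take (s - f) ++ [cs[s]] := by
          rw [show s + 1 - f = (s - f) + 1 from by omega, List.take_succ]
          rw [List.getElem?_drop]
          rw [show f + (s - f) = s from by omega]
          rw [List.getElem?_eq_getElem hs]
          rfl
        rw [h2]
        simp [fkBody, hup, PySem.Chars.lower]
    · have hs' : ¬ s < cs.length := hs
      rw [fkWords_base cs f s [] hs', List.nil_append, PySem.Chars.join_singleton]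
      rw [PySem.List.slice_natCast]
      rw [show cs.drop s = ([] : List Char) from List.drop_eq_nil_of_le (by omega)]
      simp [fkBody]

theorem fkInner_eq (sec : List Char) :
    PySem.Chars.join ['_'] (fkWords sec 0 1 []) = fkInner sec := by
  rw [fkWords_join sec.length sec 0 1 (by omega) (by omega)]
  cases sec with
  | nil => simp [fkInner, fkBody, PySem.Chars.lower]
  | cons c rest => simp [fkInner, PySem.Chars.lower]

theorem foldB : ∀ (cs out : List Char) (prev : Option Char),
    (cs.foldl
      (fun (st : List Char × Option Char) c =>
        ((if PySem.Chars.isupper c &&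
              (match st.2 with | none => false | some p => p != '_') then
            st.1 ++ ['_']
          else st.1) ++ [PySem.Chars.lowerChar c], some c))
      (out, prev)).1 =
      out ++ fkGo cs (match prev with | none => true | some p => p == '_') := by
  intro cs
  induction cs with
  | nil => intro out prev; simp [fkGo]
  | cons c rest ih =>
    intro out prev
    rw [List.foldl_cons, ih]
    simp only [fkGo]
    cases prev with
    | none => simp
    | some p =>
      by_cases hp : p = '_'
      · subst hp; simp
      · have h1 : (p != '_') = true := by simpa using hp
        have h2 : (p == '_') = false := by simpa using hp
        simp only [h1, h2]
        by_cases hup : PySem.Chars.isupper c <;> simp [hup]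

theorem format_key_spec : Claim_equal_format_key := by
  intro key _
  unfold Spec_format_key format_key format_key_alt
  rw [splitOn_eq_mySplit]
  have hmap : (mySplit key.toList).map
      (fun sec => PySem.Chars.join ['_'] (fkWords sec 0 1 [])) =
      (mySplit key.toList).map fkInner := by
    exact List.map_congr_left (fun sec _ => fkInner_eq sec)
  rw [hmap, join_map_inner]
  rw [foldB key.toList [] none]
  rfl
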